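-- pv_equiv track=rewrite | github.com/okayniti/Aurora | backend/app/ml/burnout_model/features.py | compute_deep_work_streak
-- ===== SOURCE A (Python) =====
-- from typing import Dict, List, Optional
--
-- def compute_deep_work_streak(
--
--     activity_log: List[Dict],
-- ) -> int:
--     """
--     Count consecutive deep work hours from the most recent entries.
--
--     Args:
--         activity_log: List of dicts with 'type' ('deep_work', 'break', etc.)
--                       ordered chronologically
--
--     Returns:
--         Current streak of deep work hours
--     """
--     streak = 0
--     for entry in reversed(activity_log):
--         if entry.get("type") == "deep_work":
--             streak += 1
--         else:
--             break
--     return streak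
-- ===== SOURCE B (Python) =====
-- from typing import Dict, List
--
-- def compute_deep_work_streak(activity_log: List[Dict]) -> int:
--     streak = 0
--     for entry in activity_log:
--         if entry.get("type") == "deep_work":
--             streak += 1
--         else:
--             streak = 0
--     return streak
-- ===== Notes on version B (the rewrite author's own statement) =====
-- stated objective: alternative
-- what changed: Single forward pass with a reset-to-zero streak accumulator instead of iterating over reversed(activity_log) with an early break.
import Mathlib
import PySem

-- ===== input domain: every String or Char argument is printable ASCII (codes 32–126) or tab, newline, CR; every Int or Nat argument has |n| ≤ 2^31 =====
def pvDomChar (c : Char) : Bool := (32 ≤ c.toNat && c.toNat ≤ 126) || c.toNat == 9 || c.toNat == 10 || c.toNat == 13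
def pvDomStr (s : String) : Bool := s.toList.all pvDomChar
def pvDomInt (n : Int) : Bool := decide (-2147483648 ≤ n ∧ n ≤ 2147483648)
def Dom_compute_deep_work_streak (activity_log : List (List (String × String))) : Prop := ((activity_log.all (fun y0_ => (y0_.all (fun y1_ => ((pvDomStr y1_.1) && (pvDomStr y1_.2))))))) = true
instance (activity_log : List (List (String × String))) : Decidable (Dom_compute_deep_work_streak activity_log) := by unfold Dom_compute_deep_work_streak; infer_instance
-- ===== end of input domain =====

-- B changes A's reversed-iteration-with-break into a single forward pass with a reset-to-zero accumulator (alternative decomposition, same result).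

-- ===== PORT A =====
-- loop over reversed(activity_log), breaking at the first non-deep_work entry
def pvAuxA_compute_deep_work_streak : List (List (String × String)) → Int
  | [] => 0
  | entry :: rest =>
      if (PySem.Dict.mk entry).get? "type" == some "deep_work" then
        1 + pvAuxA_compute_deep_work_streak rest
      else 0

def compute_deep_work_streak (activity_log : List (List (String × String))) : Int :=
  pvAuxA_compute_deep_work_streak activity_log.reverse

-- ===== PORT B =====
def compute_deep_work_streak_alt (activity_log : List (List (String × String))) : Int :=
  activity_log.foldl
    (fun streak entry =>
      if (PySem.Dict.mk entry).get? "type" == some "deep_work" then streak + 1 else 0) 0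

-- ===== PRECONDITION & SPEC =====
def Spec_compute_deep_work_streak (activity_log : List (List (String × String))) (out : Int) : Prop := out = compute_deep_work_streak_alt activity_log
instance (activity_log : List (List (String × String))) (out : Int) : Decidable (Spec_compute_deep_work_streak activity_log out) := by unfold Spec_compute_deep_work_streak; infer_instance

-- ===== CLAIM (what is proved, stated in full; the proofs are below) =====
def Claim_equal_compute_deep_work_streak : Prop := ∀ (activity_log : List (List (String × String))), Dom_compute_deep_work_streak activity_log → Spec_compute_deep_work_streak activity_log (compute_deep_work_streak activity_log)

-- ===== LEMMAS AND PROOFS =====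

-- B's forward fold from any start equals A's trailing count (induction on a snoc of the list).
theorem pv_fold_eq_auxA (l : List (List (String × String))) :
    compute_deep_work_streak_alt l = pvAuxA_compute_deep_work_streak l.reverse := by
  induction l using List.reverseRecOn with
  | nil => rfl
  | append_singleton l e ih =>
      simp only [compute_deep_work_streak_alt, List.foldl_append, List.foldl_cons,
        List.foldl_nil, List.reverse_append, List.reverse_cons, List.reverse_nil,
        List.nil_append, List.cons_append, pvAuxA_compute_deep_work_streak]
      simp only [compute_deep_work_streak_alt] at ih
      split
      · rw [ih]; ring
      · rfl

-- ===== VERDICT (by name: the statement is the Claim_ definition above) =====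
theorem compute_deep_work_streak_spec : Claim_equal_compute_deep_work_streak := by
  intro l _
  unfold Spec_compute_deep_work_streak compute_deep_work_streak
  exact (pv_fold_eq_auxA l).symm
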